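-- pv_equiv track=rewrite | github.com/godvina/ResearchAnalyst | src/services/image_description_service.py | extract_mentioned_entities
-- ===== SOURCE A (Python) =====
-- def extract_mentioned_entities(description: str, entity_names: list[str]) -> list[str]:
--     """Find entity names mentioned in a description via case-insensitive substring match.
--
--     For each entity name in *entity_names*, checks if it appears as a
--     case-insensitive substring in *description*.
--
--     Args:
--         description: The image description text.
--         entity_names: List of known entity names (original casing preserved).
--
--     Returns:
--         List of matched entity names in their original casing.
--     """
--     if not description or not entity_names:
--         return []
--
--     description_lower = description.lower()
--     matched = []
--     for name in entity_names:
--         if name and name.lower() in description_lower: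
--             matched.append(name)
--     return matched
-- ===== SOURCE B (Python) =====
-- def extract_mentioned_entities(description: str, entity_names: list[str]) -> list[str]:
--     """Fixed-length sliding-window multi-pattern matching: group the distinct
--     lowercased names by length, slide a window of each length over the lowercased
--     description once, and collect the windows that are known names."""
--     dl = description.lower()
--     targets = {n.lower() for n in entity_names if n}
--     found = set()
--     for length in {len(t) for t in targets}:
--         for i in range(len(dl) - length + 1):
--             window = dl[i:i + length]
--             if window in targets:
--                 found.add(window)
--     return [n for n in entity_names if n and n.lower() in found]
-- ===== Notes on version B (the rewrite author's own statement) =====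
-- stated objective: faster
-- what changed: Instead of running one substring search over the description per entity name, B does multi-pattern matching: it dedupes the lowercased names into a set, slides a window of each distinct name length over the description once, records which windows are known names, and answers each name by a set lookup (per-name scans replaced by per-distinct-length scans).
import Mathlib
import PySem

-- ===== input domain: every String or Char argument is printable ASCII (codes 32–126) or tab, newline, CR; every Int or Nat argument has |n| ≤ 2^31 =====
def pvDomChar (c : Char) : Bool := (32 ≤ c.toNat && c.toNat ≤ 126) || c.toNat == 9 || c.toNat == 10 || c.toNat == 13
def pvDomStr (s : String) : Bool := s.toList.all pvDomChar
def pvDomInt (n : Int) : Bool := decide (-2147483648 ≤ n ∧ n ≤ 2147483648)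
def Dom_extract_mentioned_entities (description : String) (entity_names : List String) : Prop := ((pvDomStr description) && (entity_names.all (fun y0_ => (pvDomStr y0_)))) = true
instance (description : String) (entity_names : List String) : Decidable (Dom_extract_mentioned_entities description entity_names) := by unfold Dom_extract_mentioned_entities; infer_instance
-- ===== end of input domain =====

-- B replaces the per-name substring search by multi-pattern sliding-window matching:
-- one pass over the description per distinct name length, collecting the windows that
-- are (lowercased) names, then one set lookup per name (objective: faster; measured faster on the generated timing inputs).

-- ===== PORT A =====
def extract_mentioned_entities (description : String) (entity_names : List String) : List String :=
  if description = "" ∨ entity_names = [] then []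
  else
    let description_lower := PySem.Str.lower description
    entity_names.foldl
      (fun matched name =>
        if (decide (name ≠ "") && PySem.Str.isIn (PySem.Str.lower name) description_lower) = true
        then matched ++ [name] else matched) []

-- ===== PORT B =====
def extract_mentioned_entities_alt (description : String) (entity_names : List String) : List String :=
  let dl : List Char := PySem.Chars.lower description.toList
  let targets : PySem.Set (List Char) :=
    PySem.Set.ofList ((entity_names.filter (fun n => decide (n ≠ ""))).map (fun n => PySem.Chars.lower n.toList))
  let lengths : PySem.Set Int := PySem.Set.ofList (targets.map (fun t => PySem.Chars.len t))
  let found : PySem.Set (List Char) :=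
    lengths.foldl
      (fun a L =>
        (PySem.List.pyRange 0 (PySem.Chars.len dl - L + 1) 1).foldl
          (fun a i =>
            let w := PySem.Chars.slice dl (some i) (some (i + L))
            if PySem.Set.contains targets w then PySem.Set.add a w else a) a)
      PySem.Set.empty
  entity_names.filter (fun n => decide (n ≠ "") && PySem.Set.contains found (PySem.Chars.lower n.toList))

-- ===== PRECONDITION & SPEC =====
def Spec_extract_mentioned_entities (description : String) (entity_names : List String) (out : List String) : Prop := out = extract_mentioned_entities_alt description entity_names
instance (description : String) (entity_names : List String) (out : List String) : Decidable (Spec_extract_mentioned_entities description entity_names out) := by unfold Spec_extract_mentioned_entities; infer_instance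

-- ===== CLAIM (what is proved, stated in full; the proofs are below) =====
def Claim_equal_extract_mentioned_entities : Prop := ∀ (description : String) (entity_names : List String), Dom_extract_mentioned_entities description entity_names → Spec_extract_mentioned_entities description entity_names (extract_mentioned_entities description entity_names)

-- ===== LEMMAS AND PROOFS =====

-- membership in a set built by a conditional-add loop
theorem pv_mem_foldl_cond_add {α γ : Type} [BEq α] [LawfulBEq α]
    (l : List γ) (g : γ → α) (p : α → Bool) (s : PySem.Set α) (x : α) :
    x ∈ l.foldl (fun a i => if p (g i) then PySem.Set.add a (g i) else a) s
      ↔ x ∈ s ∨ ∃ i ∈ l, p (g i) = true ∧ x = g i := by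
  induction l generalizing s with
  | nil => simp
  | cons hd tl ih =>
    simp only [List.foldl_cons, List.mem_cons]
    by_cases hp : p (g hd) = true
    · rw [if_pos hp, ih, PySem.Set.mem_add]
      constructor
      · rintro ((h | rfl) | ⟨i, hi, hpi, rfl⟩)
        · exact Or.inl h
        · exact Or.inr ⟨hd, Or.inl rfl, hp, rfl⟩
        · exact Or.inr ⟨i, Or.inr hi, hpi, rfl⟩
      · rintro (h | ⟨i, (rfl | hi), hpi, rfl⟩)
        · exact Or.inl (Or.inl h)
        · exact Or.inl (Or.inr rfl)
        · exact Or.inr ⟨i, hi, hpi, rfl⟩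
    · rw [if_neg hp, ih]
      constructor
      · rintro (h | ⟨i, hi, hpi, rfl⟩)
        · exact Or.inl h
        · exact Or.inr ⟨i, Or.inr hi, hpi, rfl⟩
      · rintro (h | ⟨i, (rfl | hi), hpi, rfl⟩)
        · exact Or.inl h
        · exact absurd hpi hp
        · exact Or.inr ⟨i, hi, hpi, rfl⟩

-- membership in a set built by the doubly nested conditional-add loop
theorem pv_mem_foldl_foldl_cond_add {α β γ : Type} [BEq α] [LawfulBEq α]
    (out : List β) (inn : β → List γ) (f : β → γ → α) (p : α → Bool) (s : PySem.Set α) (x : α) :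
    x ∈ out.foldl (fun a L => (inn L).foldl (fun a i => if p (f L i) then PySem.Set.add a (f L i) else a) a) s
      ↔ x ∈ s ∨ ∃ L ∈ out, ∃ i ∈ inn L, p (f L i) = true ∧ x = f L i := by
  induction out generalizing s with
  | nil => simp
  | cons hd tl ih =>
    simp only [List.foldl_cons, ih, pv_mem_foldl_cond_add, List.mem_cons]
    constructor
    · rintro ((h | ⟨i, hi, hpi, rfl⟩) | ⟨L, hL, i, hi, hpi, rfl⟩)
      · exact Or.inl h
      · exact Or.inr ⟨hd, Or.inl rfl, i, hi, hpi, rfl⟩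
      · exact Or.inr ⟨L, Or.inr hL, i, hi, hpi, rfl⟩
    · rintro (h | ⟨L, (rfl | hL), i, hi, hpi, rfl⟩)
      · exact Or.inl (Or.inl h)
      · exact Or.inl (Or.inr ⟨i, hi, hpi, rfl⟩)
      · exact Or.inr ⟨L, hL, i, hi, hpi, rfl⟩

-- a nonnegative slice of dl is an infix of dl
theorem pv_slice_infix (dl x : List Char) (i L : Int) (hi : 0 ≤ i) (hL : 0 ≤ L)
    (h : PySem.Chars.slice dl (some i) (some (i + L)) = x) : x <:+: dl := by
  rw [PySem.Chars.slice_eq_listSlice, PySem.List.slice_toNat dl hi (by omega)] at h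
  subst h
  exact ((List.take_prefix _ _).isInfix).trans (List.drop_suffix _ _).isInfix

-- an infix of dl is the window of its own length at some scanned start position
theorem pv_infix_slice (dl x : List Char) (h : x <:+: dl) :
    ∃ i ∈ PySem.List.pyRange 0 ((dl.length : Int) - (x.length : Int) + 1) 1,
      PySem.Chars.slice dl (some i) (some (i + (x.length : Int))) = x := by
  obtain ⟨s, t, rfl⟩ := h
  refine ⟨(s.length : Int), ?_, ?_⟩
  · rw [PySem.List.mem_pyRange_one]
    have : (s ++ x ++ t).length = s.length + x.length + t.length := by
      simp [Nat.add_assoc]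
    constructor
    · exact_mod_cast Nat.zero_le _
    · rw [this]; push_cast; omega
  · rw [PySem.Chars.slice_eq_listSlice, PySem.List.slice_natCast_add (s ++ x ++ t) s.length x.length]
    simp

-- ===== VERDICT (by name: the statement is the Claim_ definition above) =====
theorem extract_mentioned_entities_spec : Claim_equal_extract_mentioned_entities := by
  intro d ns _
  unfold Spec_extract_mentioned_entities extract_mentioned_entities extract_mentioned_entities_alt
  simp only [PySem.Chars.len_eq]
  by_cases hg : d = "" ∨ ns = []
  · rw [if_pos hg]
    rcases hg with hd | hns
    · subst hd
      -- empty description: no window of positive length exists, found stays empty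
      symm
      simp only [List.filter_eq_nil_iff, Bool.and_eq_true, decide_eq_true_eq, not_and]
      intro n hn hne
      rw [PySem.Set.contains_iff, pv_mem_foldl_foldl_cond_add]
      rintro (h | ⟨L, hL, i, hi, _, _⟩)
      · simp [PySem.Set.empty] at h
      · have hL0 : 0 ≤ L := by
          rw [PySem.Set.mem_ofList] at hL
          obtain ⟨t, _, rfl⟩ := List.mem_map.mp hL
          simp
        have hL1 : 1 ≤ L := by
          rw [PySem.Set.mem_ofList] at hL
          obtain ⟨t, ht, rfl⟩ := List.mem_map.mp hL
          rw [PySem.Set.mem_ofList] at ht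
          obtain ⟨m, hm, rfl⟩ := List.mem_map.mp ht
          have hmne : m ≠ "" := by
            have := List.mem_filter.mp hm
            simpa using this.2
          have : m.toList ≠ [] := fun h => hmne (String.toList_eq_nil_iff.mp h)
          have : 0 < m.toList.length := List.length_pos_iff.mpr this
          simp only [PySem.Chars.lower, List.length_map]
          omega
        rw [PySem.List.mem_pyRange_one] at hi
        have hdl : PySem.Chars.lower "".toList = [] := by decide
        rw [hdl] at hi
        simp only [List.length_nil, Nat.cast_zero] at hi
        omega
    · subst hns; rfl
  · rw [if_neg hg]
    rw [PySem.List.foldl_append_if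
      (fun name => decide (name ≠ "") && PySem.Str.isIn (PySem.Str.lower name) (PySem.Str.lower d))
      (fun x => x) ns []]
    rw [List.nil_append, List.map_id']
    apply List.filter_congr
    intro n hn
    by_cases hne : n = ""
    · simp [hne]
    · simp only [hne, ne_eq, not_false_iff, decide_true, Bool.true_and]
      rw [Bool.eq_iff_iff, PySem.Str.isIn_eq, PySem.Str.toList_lower, PySem.Str.toList_lower,
        PySem.Chars.isIn_iff_infix, PySem.Set.contains_iff]
      set dl := PySem.Chars.lower d.toList with hdl
      set x := PySem.Chars.lower n.toList with hx
      have hxtarget : x ∈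
          PySem.Set.ofList ((ns.filter (fun n => decide (n ≠ ""))).map (fun n => PySem.Chars.lower n.toList)) := by
        rw [PySem.Set.mem_ofList]
        exact List.mem_map.mpr ⟨n, List.mem_filter.mpr ⟨hn, by simp [hne]⟩, rfl⟩
      constructor
      · intro hinf
        rw [pv_mem_foldl_foldl_cond_add]
        refine Or.inr ?_
        obtain ⟨i, hi, hsl⟩ := pv_infix_slice dl x hinf
        refine ⟨(x.length : Int), ?_, i, by simpa [PySem.Chars.len_eq] using hi, ?_, hsl.symm⟩
        · rw [PySem.Set.mem_ofList]
          exact List.mem_map.mpr ⟨x, hxtarget, by simp⟩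
        · rw [hsl]
          exact (PySem.Set.contains_iff _ _).mpr hxtarget
      · intro hmem
        rw [pv_mem_foldl_foldl_cond_add] at hmem
        rcases hmem with h | ⟨L, hL, i, hi, _, hxeq⟩
        · simp [PySem.Set.empty] at h
        · have hi0 : 0 ≤ i := (PySem.List.mem_pyRange_one.mp hi).1
          have hL0 : 0 ≤ L := by
            rw [PySem.Set.mem_ofList] at hL
            obtain ⟨t, _, rfl⟩ := List.mem_map.mp hL
            simp
          exact pv_slice_infix dl x i L hi0 hL0 hxeq.symm
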